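-- pv_equiv track=rewrite | github.com/TousakaNagio/EECP_onlinejudge | MaxMagicSquare.py | solution
-- ===== SOURCE A (Python) =====
-- def solution(A):
--     # write your code in Python 3.6
--     row = len(A)
--     col = len(A[0])
--     min_ = min(row,col)
--     for k in range(min_,0,-1):
--         for i in range(col-k+1):
--             for j in range(row-k+1):
--                 a = A[j:j+k]
--                 a = transpose(a)
--                 a = a[i:i+k]
--                 if is_equal(a):
--                     return k
--     return 0
--
-- def transpose(N):
--     return [list(row) for row in zip(*N)]
--     pass
--
-- def is_equal(N):
--     n = transpose(N)
--     a = []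
--     b = []
--     for i in N:
--         a.append(sum(i))
--     if len(set(a))!=1:
--         return False
--     for i in n:
--         b.append(sum(i))
--     if len(set(b))!=1:
--         return False
--     if a[0] != b[0]:
--         return False
--
--     return True
--     pass
-- ===== SOURCE B (Python) =====
-- def solution(A):
--     row = len(A)
--     col = len(A[0])
--     for k in range(min(row, col), 0, -1):
--         for j in range(row - k + 1):
--             rows = A[j:j + k]
--             band = [list(t) for t in zip(*rows)]   # the band's columns
--             colsum = [sum(c) for c in band]
--             cum = [[0] * k]                        # running per-row sums along the columns
--             for c in band:
--                 cum.append([x + y for x, y in zip(cum[-1], c)])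
--             for i in range(col - k + 1):
--                 cs = colsum[i:i + k]
--                 if not cs or any(s != cs[0] for s in cs):
--                     continue
--                 lo, hi = cum[i], cum[i + len(cs)]
--                 if all(h - l == cs[0] for h, l in zip(hi, lo)):
--                     return k
--     return 0
-- ===== Notes on version B (the rewrite author's own statement) =====
-- stated objective: faster
-- what changed: B searches by row-band: for each band it builds the column list and its running cumulative sums once, then decides every horizontal window from slices and two cumulative vectors, instead of A's building, transposing and re-summing fresh sublists per window.
import Mathlib
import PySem

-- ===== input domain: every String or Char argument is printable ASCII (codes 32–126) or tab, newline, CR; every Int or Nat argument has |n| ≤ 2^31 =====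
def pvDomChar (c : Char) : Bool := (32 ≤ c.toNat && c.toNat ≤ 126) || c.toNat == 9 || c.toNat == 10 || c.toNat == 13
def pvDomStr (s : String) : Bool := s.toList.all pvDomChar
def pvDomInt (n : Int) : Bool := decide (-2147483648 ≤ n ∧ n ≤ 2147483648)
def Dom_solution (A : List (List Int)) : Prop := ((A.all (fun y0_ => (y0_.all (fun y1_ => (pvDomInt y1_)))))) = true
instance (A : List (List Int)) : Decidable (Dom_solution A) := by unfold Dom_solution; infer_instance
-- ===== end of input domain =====

-- B factors the search by row-band: per band it builds the truncated column list once with running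
-- column-wise cumulative sums, deciding each window by slices, instead of A's rebuilding and
-- transposing fresh sublists for every single window (objective: faster).


-- ===== PORT A =====
-- min row length, as zip(*N) truncates (0 for no rows)
def pvMinLen : List (List Int) → Nat
  | [] => 0
  | r :: rs => rs.foldl (fun m s => min m s.length) r.length

-- transpose(N) = [list(row) for row in zip(*N)]: zip(*N) ported by its spec —
-- truncate at the shortest row; the t-th output row collects the t-th element of every row
def pvTransposeA (N : List (List Int)) : List (List Int) :=
  (List.range (pvMinLen N)).map (fun t => N.map (fun r => r.getD t 0))

-- is_equal(N); a[0]/b[0] are read as headD, reached only behind the len(set(..)) == 1 guards (lists nonempty there)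
def pvIsEqualA (N : List (List Int)) : Bool :=
  let n := pvTransposeA N
  let a : List Int := N.map (fun r => r.sum)
  if (PySem.Set.ofList a).length ≠ 1 then false
  else
    let b : List Int := n.map (fun r => r.sum)
    if (PySem.Set.ofList b).length ≠ 1 then false
    else if a.headD 0 ≠ b.headD 0 then false else true

-- A[j:j+k] / a[i:i+k] with nonnegative in-range bounds = take/drop; range(m,0,-1) = (range m).reverse.map (+1)
def solution (A : List (List Int)) : Int :=
  let row := A.length
  let col := (A.headD []).length
  let mn := min row col
  match ((List.range mn).reverse.map (· + 1)).find? (fun k =>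
      (List.range (col - k + 1)).any (fun i =>
        (List.range (row - k + 1)).any (fun j =>
          pvIsEqualA (List.take k (List.drop i (pvTransposeA (List.take k (List.drop j A)))))))) with
  | some k => (k : Int)
  | none => 0

-- ===== PORT B =====
-- [list(t) for t in zip(*rows)], ported by zip(*)'s spec: truncate at the shortest row
def pvZipStar (rows : List (List Int)) : List (List Int) :=
  (List.range (pvMinLen rows)).map (fun t => rows.map (fun r => r.getD t 0))

-- the cum list: cum[0] = [0]*k, cum.append([x+y for x,y in zip(cum[-1], c)]) per column c
def pvCumGo (prev : List Int) : List (List Int) → List (List Int)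
  | [] => [prev]
  | c :: cs => prev :: pvCumGo (List.zipWith (· + ·) prev c) cs

-- the inner-i body: cs = colsum[i:i+k]; skip unless cs nonempty and constant; then compare the
-- per-row window sums hi - lo against cs[0]
def pvBandCheck (colsum : List Int) (cum : List (List Int)) (k i : Nat) : Bool :=
  let cs := List.take k (List.drop i colsum)
  if cs.isEmpty then false
  else if cs.any (fun s => s ≠ cs.headD 0) then false
  else
    (List.zipWith (fun h l => h - l) (cum.getD (i + cs.length) []) (cum.getD i [])).all
      (fun s => s == cs.headD 0)

def solution_alt (A : List (List Int)) : Int :=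
  let row := A.length
  let col := (A.headD []).length
  match ((List.range (min row col)).reverse.map (· + 1)).find? (fun k =>
      (List.range (row - k + 1)).any (fun j =>
        let band := pvZipStar (List.take k (List.drop j A))
        let colsum := band.map (fun c => c.sum)
        let cum := pvCumGo (List.replicate k 0) band
        (List.range (col - k + 1)).any (fun i => pvBandCheck colsum cum k i))) with
  | some k => (k : Int)
  | none => 0

-- ===== PRECONDITION & SPEC =====
-- Python A evaluates A[0]: it raises IndexError exactly on the empty list (B raises there too)
def Pre_solution (A : List (List Int)) : Prop := A ≠ []
instance (A : List (List Int)) : Decidable (Pre_solution A) := by unfold Pre_solution; infer_instance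
def pvWitness_solution : List (List Int) := ([[1, 2], [3, 4]])

def Spec_solution (A : List (List Int)) (out : Int) : Prop := out = solution_alt A
instance (A : List (List Int)) (out : Int) : Decidable (Spec_solution A out) := by unfold Spec_solution; infer_instance

-- ===== CLAIM (what is proved, stated in full; the proofs are below) =====
def Claim_equal_solution : Prop := ∀ (A : List (List Int)), Dom_solution A → Pre_solution A → Spec_solution A (solution A)

-- ===== LEMMAS AND PROOFS =====

theorem pv_add_len_mono (s : List Int) (xs : List Int) :
    s.length ≤ (xs.foldl PySem.Set.add s).length := by
  induction xs generalizing s with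
  | nil => simp
  | cons y ys ih =>
    refine le_trans ?_ (ih (PySem.Set.add s y))
    unfold PySem.Set.add
    split <;> simp

theorem pv_foldl_add_singleton (xs : List Int) (x : Int) :
    ((xs.foldl PySem.Set.add [x]).length = 1) ↔ ∀ y ∈ xs, y = x := by
  induction xs with
  | nil => simp
  | cons y ys ih =>
    by_cases h : y = x
    · subst h
      have : PySem.Set.add [y] y = [y] := by unfold PySem.Set.add; simp
      rw [List.foldl_cons, this]
      simp [ih]
    · have hadd : PySem.Set.add [x] y = [x, y] := by
        unfold PySem.Set.add
        have hc : PySem.Set.contains [x] y = false := by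
          simp [PySem.Set.contains_eq_listContains]
          exact fun hxy => h hxy
        rw [hc]; simp
      constructor
      · intro hl
        exfalso
        rw [List.foldl_cons, hadd] at hl
        have := pv_add_len_mono [x, y] ys
        simp at this; omega
      · intro hall
        exact absurd (hall y (by simp)) h

theorem pv_setLen1 (x : Int) (xs : List Int) :
    ((PySem.Set.ofList (x :: xs)).length = 1) ↔ ∀ y ∈ xs, y = x := by
  have h : PySem.Set.ofList (x :: xs) = xs.foldl PySem.Set.add [x] := by
    rw [PySem.Set.ofList_eq_foldl, List.foldl_cons]
    have hadd : PySem.Set.add [] x = [x] := rfl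
    rw [hadd]
  rw [h]
  exact pv_foldl_add_singleton xs x

theorem pvMinLen_const (N : List (List Int)) (k : Nat) (hne : N ≠ [])
    (h : ∀ r ∈ N, r.length = k) : pvMinLen N = k := by
  match N with
  | r :: rs =>
    simp only [pvMinLen]
    rw [h r (by simp)]
    have h' : ∀ s ∈ rs, s.length = k := fun s hs => h s (by simp [hs])
    clear h hne
    induction rs with
    | nil => simp
    | cons t ts ih =>
      simp only [List.foldl_cons, h' t (by simp), min_self]
      exact ih (fun s hs => h' s (by simp [hs]))

theorem pv_take_range' (s n k : Nat) : (List.range' s n).take k = List.range' s (min k n) := by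
  induction n generalizing s k with
  | zero => simp
  | succ n ih =>
    cases k with
    | zero => simp
    | succ k =>
      rw [List.range'_succ, List.take_succ_cons, ih]
      rw [Nat.succ_min_succ, List.range'_succ]

theorem pv_isEqual_char (N : List (List Int)) :
    pvIsEqualA N = true ↔
      (PySem.Set.ofList (N.map (fun r => r.sum))).length = 1 ∧
      (PySem.Set.ofList ((pvTransposeA N).map (fun r => r.sum))).length = 1 ∧
      (N.map (fun r => r.sum)).headD 0 = ((pvTransposeA N).map (fun r => r.sum)).headD 0 := by
  simp only [pvIsEqualA]
  split_ifs with h1 h2 h3 <;> simp_all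

theorem pv_ite_chain2 (p q r : Bool) :
    ((if p then false else if q then false else r) = true) ↔
      (p = false ∧ q = false ∧ r = true) := by
  cases p <;> cases q <;> simp

theorem pv_zipWith_add_getD (a b : List Int) (h : a.length = b.length) (s : Nat) :
    (List.zipWith (· + ·) a b).getD s 0 = a.getD s 0 + b.getD s 0 := by
  by_cases hs : s < a.length
  · rw [List.getD_eq_getElem _ _ (by simp [List.length_zipWith]; omega),
      List.getElem_zipWith, List.getD_eq_getElem _ _ hs, List.getD_eq_getElem _ _ (by omega)]
  · rw [List.getD_eq_default _ _ (by simp [List.length_zipWith]; omega),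
      List.getD_eq_default _ _ (by omega), List.getD_eq_default _ _ (by omega)]
    simp

theorem pv_zipWith_add_len (a b : List Int) (h : a.length = b.length) :
    (List.zipWith (· + ·) a b).length = a.length := by
  simp [List.length_zipWith]; omega

theorem pv_cumGo_len (band : List (List Int)) (prev : List Int)
    (hb : ∀ c ∈ band, c.length = prev.length) (p : Nat) (hp : p ≤ band.length) :
    ((pvCumGo prev band).getD p []).length = prev.length := by
  induction band generalizing prev p with
  | nil =>
    cases p with
    | zero => simp [pvCumGo]
    | succ p => simp at hp
  | cons c cs ih =>
    cases p with
    | zero => simp [pvCumGo]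
    | succ p =>
      simp only [pvCumGo, List.getD_cons_succ]
      rw [ih (List.zipWith (· + ·) prev c)
        (fun d hd => by rw [pv_zipWith_add_len prev c (hb c (by simp)).symm]; exact hb d (by simp [hd]))
        p (by simpa using hp)]
      exact pv_zipWith_add_len prev c (hb c (by simp)).symm

theorem pv_cumGo_getD (band : List (List Int)) (prev : List Int)
    (hb : ∀ c ∈ band, c.length = prev.length) (p : Nat) (hp : p ≤ band.length) (s : Nat) :
    ((pvCumGo prev band).getD p []).getD s 0 =
      prev.getD s 0 + ((band.take p).map (fun c => c.getD s 0)).sum := by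
  induction band generalizing prev p with
  | nil =>
    cases p with
    | zero => simp [pvCumGo]
    | succ p => simp at hp
  | cons c cs ih =>
    cases p with
    | zero => simp [pvCumGo]
    | succ p =>
      simp only [pvCumGo, List.getD_cons_succ, List.take_succ_cons, List.map_cons, List.sum_cons]
      rw [ih (List.zipWith (· + ·) prev c)
        (fun d hd => by rw [pv_zipWith_add_len prev c (hb c (by simp)).symm]; exact hb d (by simp [hd]))
        p (by simpa using hp)]
      rw [pv_zipWith_add_getD prev c (hb c (by simp)).symm s]
      ring

theorem pv_any_congr {α : Type} (l : List α) (p q : α → Bool) (h : ∀ a ∈ l, p a = q a) :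
    l.any p = l.any q := by
  induction l with
  | nil => rfl
  | cons a l ih =>
    simp only [List.any_cons]
    rw [h a (by simp), ih (fun b hb => h b (by simp [hb]))]

theorem pv_find?_congr {α : Type} (l : List α) (p q : α → Bool) (h : ∀ a ∈ l, p a = q a) :
    l.find? p = l.find? q := by
  induction l with
  | nil => rfl
  | cons a l ih =>
    rw [List.find?_cons, List.find?_cons, h a (by simp), ih (fun b hb => h b (by simp [hb]))]

theorem pv_any_swap (a b : Nat) (p : Nat → Nat → Bool) :
    (List.range a).any (fun i => (List.range b).any (fun j => p i j)) =
    (List.range b).any (fun j => (List.range a).any (fun i => p i j)) := by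
  rw [Bool.eq_iff_iff]
  simp only [List.any_eq_true]
  exact ⟨fun ⟨i, hi, j, hj, h⟩ => ⟨j, hj, i, hi, h⟩, fun ⟨j, hj, i, hi, h⟩ => ⟨i, hi, j, hj, h⟩⟩

theorem pv_take_min {α : Type} (l : List α) (k : Nat) : l.take (min k l.length) = l.take k := by
  rcases le_total k l.length with h | h
  · rw [min_eq_left h]
  · rw [min_eq_right h, List.take_of_length_le h, List.take_of_length_le (le_refl _)]

theorem pv_band_eq (rows : List (List Int)) (k i : Nat) (hk : 1 ≤ k) (hlen : rows.length = k) :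
    pvIsEqualA (List.take k (List.drop i (pvTransposeA rows))) =
    pvBandCheck ((pvZipStar rows).map (fun c => c.sum))
      (pvCumGo (List.replicate k 0) (pvZipStar rows)) k i := by
  have hband : pvZipStar rows = pvTransposeA rows := rfl
  rw [hband]
  set m := pvMinLen rows with hm
  set band := pvTransposeA rows with hbnd
  have hbandlen : band.length = m := by simp [hbnd, pvTransposeA, hm]
  have hbentk : ∀ c ∈ band, c.length = k := by
    intro c hc
    rw [hbnd, pvTransposeA] at hc
    obtain ⟨t, _, rfl⟩ := List.mem_map.mp hc
    simp [hlen]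
  set L := min k (m - i) with hL
  have hW : List.take k (List.drop i band) =
      (List.range' i L).map (fun t => rows.map (fun r => r.getD t 0)) := by
    simp only [hbnd, pvTransposeA, ← hm]
    rw [← List.map_drop, ← List.map_take, List.range_eq_range', List.drop_range', pv_take_range']
    norm_num
    rfl
  have hcs : List.take k (List.drop i (band.map (fun c => c.sum))) =
      (List.range' i L).map (fun t => (rows.map (fun r => r.getD t 0)).sum) := by
    rw [← List.map_drop, ← List.map_take, hW, List.map_map]
    rfl
  by_cases him : m ≤ i
  · -- the clipped window is empty: both sides are false
    have hL0 : L = 0 := by omega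
    have hcsE : List.take k (List.drop i (band.map (fun c => c.sum))) = [] := by
      rw [hcs, hL0]; simp
    have hWE : List.take k (List.drop i band) = [] := by rw [hW, hL0]; simp
    rw [hWE]
    simp only [pvBandCheck, hcsE, List.isEmpty_nil, if_true]
    decide
  · -- i < m
    obtain ⟨k', rfl⟩ : ∃ k', k = k' + 1 := ⟨k - 1, by omega⟩
    set k := k' + 1 with hkdef
    have hL1 : 1 ≤ L := by omega
    have hLm : i + L ≤ m := by omega
    have hsplit : List.range' i L = i :: List.range' (i + 1) (L - 1) := by
      have h1 : L = (L - 1) + 1 := by omega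
      conv_lhs => rw [h1]
      rw [List.range'_succ]
    -- B's cumulative vectors
    have hrep : (List.replicate k (0 : Int)).length = k := by simp
    have hbk : ∀ c ∈ band, c.length = (List.replicate k (0 : Int)).length := by
      intro c hc; rw [hrep]; exact hbentk c hc
    have hhiD : ∀ s : Nat, ((pvCumGo (List.replicate k 0) band).getD (i + L) []).getD s 0 =
        ((band.take (i + L)).map (fun c => c.getD s 0)).sum := by
      intro s
      rw [pv_cumGo_getD band _ hbk (i + L) (by omega) s]
      simp
    have hloD : ∀ s : Nat, ((pvCumGo (List.replicate k 0) band).getD i []).getD s 0 =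
        ((band.take i).map (fun c => c.getD s 0)).sum := by
      intro s
      rw [pv_cumGo_getD band _ hbk i (by omega) s]
      simp
    have hhiL : ((pvCumGo (List.replicate k 0) band).getD (i + L) []).length = k := by
      rw [pv_cumGo_len band _ hbk (i + L) (by omega), hrep]
    have hloL : ((pvCumGo (List.replicate k 0) band).getD i []).length = k := by
      rw [pv_cumGo_len band _ hbk i (by omega), hrep]
    have hWL : (band.drop i).take L = List.take k (List.drop i band) := by
      have h1 : L = min k (band.drop i).length := by
        rw [List.length_drop, hbandlen]
      rw [h1, pv_take_min]
    have htake : band.take (i + L) = band.take i ++ (band.drop i).take L := List.take_add ..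
    -- the per-row window sums equal the transposed window's row sums
    set W := (List.range' i L).map (fun t => rows.map (fun r => r.getD t 0)) with hWdef
    set bl := (List.range k).map (fun s => (W.map (fun col => col.getD s 0)).sum) with hbl
    have hrs : List.zipWith (fun h l => h - l)
        ((pvCumGo (List.replicate k 0) band).getD (i + L) [])
        ((pvCumGo (List.replicate k 0) band).getD i []) = bl := by
      refine List.ext_getElem ?_ ?_
      · rw [List.length_zipWith, hhiL, hloL, hbl]
        simp
      · intro s hs1 hs2
        rw [List.length_zipWith, hhiL, hloL, min_self] at hs1
        rw [List.getElem_zipWith]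
        rw [← List.getD_eq_getElem _ 0 (by rw [hhiL]; omega),
          ← List.getD_eq_getElem _ 0 (by rw [hloL]; omega)]
        rw [hhiD s, hloD s, htake, List.map_append, List.sum_append, hWL, hW]
        simp only [hbl, List.getElem_map, List.getElem_range]
        ring
    -- rewrite B's check
    have hcsl : ((List.range' i L).map (fun t => (rows.map (fun r => r.getD t 0)).sum)).length = L := by
      simp
    simp only [pvBandCheck, hcs, hcsl, hrs]
    -- A side characterisation
    rw [hW]
    rw [Bool.eq_iff_iff, pv_isEqual_char, pv_ite_chain2]
    -- shapes of the two lists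
    have hWrl : ∀ w ∈ W, w.length = k := by
      intro w hw
      rw [hWdef] at hw
      obtain ⟨t, _, rfl⟩ := List.mem_map.mp hw
      simp [hlen]
    have hWne : W ≠ [] := by rw [hWdef, hsplit]; simp
    have hminW : pvMinLen W = k := pvMinLen_const W k hWne hWrl
    have htW : pvTransposeA W = (List.range k).map (fun s => W.map (fun col => col.getD s 0)) := by
      simp only [pvTransposeA, hminW]
    have hbW : (pvTransposeA W).map (fun r => r.sum) = bl := by
      rw [htW, List.map_map, hbl]; rfl
    have haW : W.map (fun r => r.sum) =
        (List.range' i L).map (fun t => (rows.map (fun r => r.getD t 0)).sum) := by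
      rw [hWdef, List.map_map]; rfl
    rw [hbW, ← haW]
    -- decompose into cons form
    have hWc : W = (rows.map (fun r => r.getD i 0)) :: (List.range' (i + 1) (L - 1)).map
        (fun t => rows.map (fun r => r.getD t 0)) := by
      rw [hWdef, hsplit, List.map_cons]
    have hblc : bl = (W.map (fun col => col.getD 0 0)).sum :: (List.range' 1 k').map
        (fun s => (W.map (fun col => col.getD s 0)).sum) := by
      rw [hbl, List.range_eq_range', List.range'_succ, List.map_cons]
    rw [hWc, hblc]
    simp only [List.map_cons, List.headD_cons, List.isEmpty_cons]
    rw [pv_setLen1, pv_setLen1]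
    set c0 : Int := (rows.map (fun r => r.getD i 0)).sum
    set b0 : Int := (W.map (fun col => col.getD 0 0)).sum
    constructor
    · rintro ⟨h1, h2, h3⟩
      refine ⟨trivial, ?_, ?_⟩
      · rw [List.any_eq_false]
        intro x hx
        simp only [ne_eq, decide_eq_true_eq, not_not]
        rcases List.mem_cons.mp hx with h | h
        · exact h
        · exact h1 x h
      · rw [List.all_eq_true]
        intro x hx
        rw [beq_iff_eq]
        rcases List.mem_cons.mp hx with h | h
        · rw [h]; exact h3.symm
        · exact (h2 x h).trans h3.symm
    · rintro ⟨-, h2, h3⟩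
      rw [List.any_eq_false] at h2
      rw [List.all_eq_true] at h3
      have hb0 : b0 = c0 := by
        have := h3 b0 (by simp)
        simpa using this
      refine ⟨?_, ?_, hb0.symm⟩
      · intro y hy
        have := h2 y (List.mem_cons_of_mem _ hy)
        simpa using this
      · intro y hy
        have := h3 y (List.mem_cons_of_mem _ hy)
        have h' : y = c0 := by simpa using this
        rw [h', hb0]

theorem solution_eq_alt (A : List (List Int)) : solution A = solution_alt A := by
  simp only [solution, solution_alt]
  have hfind :
      ((List.range (min A.length (A.headD []).length)).reverse.map (· + 1)).find? (fun k =>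
        (List.range ((A.headD []).length - k + 1)).any (fun i =>
          (List.range (A.length - k + 1)).any (fun j =>
            pvIsEqualA (List.take k (List.drop i (pvTransposeA (List.take k (List.drop j A)))))))) =
      ((List.range (min A.length (A.headD []).length)).reverse.map (· + 1)).find? (fun k =>
        (List.range (A.length - k + 1)).any (fun j =>
          (List.range ((A.headD []).length - k + 1)).any (fun i =>
            pvBandCheck ((pvZipStar (List.take k (List.drop j A))).map (fun c => c.sum))
              (pvCumGo (List.replicate k 0) (pvZipStar (List.take k (List.drop j A)))) k i))) := by
    refine pv_find?_congr _ _ _ (fun k hk => ?_)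
    simp only [List.mem_map, List.mem_reverse, List.mem_range] at hk
    obtain ⟨x, hx, rfl⟩ := hk
    rw [← pv_any_swap]
    refine pv_any_congr _ _ _ (fun u hu => ?_)
    refine pv_any_congr _ _ _ (fun v hv => ?_)
    simp only [List.mem_range] at hu hv
    have hx2 := lt_min_iff.mp hx
    exact pv_band_eq (List.take (x + 1) (List.drop u A)) (x + 1) v (by omega)
      (by simp [List.length_take, List.length_drop]; omega)
  rw [hfind]

-- ===== VERDICT (by name: the statement is the Claim_ definition above) =====
theorem solution_spec : Claim_equal_solution := by
  intro A _ _
  unfold Spec_solution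
  exact solution_eq_alt A
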